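-- pv_equiv track=rewrite | github.com/pipickeke/python | src/com.pipickeke/year2025/month10/week1/3333. 找到初始输入字符串 II.py | possibleStringCount_3
-- ===== SOURCE A (Python) =====
-- from itertools import accumulate
--
-- def possibleStringCount_3(word:str, k:int)->int:
--     n = len(word)
--     if n < k:
--         return 0
--
--     cnt = 0
--     cnts = []
--     ans = 1
--     MOD = int(1e9 + 7)
--     for i in range(n):
--         cnt += 1
--         if i == n-1 or word[i] != word[i+1]:
--             if cnt > 1:
--                 if k > 0:
--                     cnts.append(cnt-1)
--                 ans = ans * cnt % MOD
--
--             k -= 1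
--             cnt = 0
--
--     if k <= 0:
--         return ans
--
--     f = [[0] * k for _ in range(len(cnts)+1)]
--     f[0] = [1]*k
--     for i, c in enumerate(cnts):
--         s = list(accumulate(f[i], initial=0))
--         for j in range(k):
--             f[i+1][j] = (s[j+1] - s[max(j-c, 0)]) % MOD
--
--     return (ans - f[-1][-1]) % MOD
-- ===== SOURCE B (Python) =====
-- def possibleStringCount_3(word: str, k: int) -> int:
--     n = len(word)
--     if n < k:
--         return 0
--
--     cnt = 0
--     cnts = []
--     ans = 1
--     MOD = int(1e9 + 7)
--     for i in range(n):
--         cnt += 1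
--         if i == n-1 or word[i] != word[i+1]:
--             if cnt > 1:
--                 if k > 0:
--                     cnts.append(cnt-1)
--                 ans = ans * cnt % MOD
--             k -= 1
--             cnt = 0
--
--     if k <= 0:
--         return ans
--
--     # exact-count DP: dp[j] = number of slack combinations summing to exactly j
--     dp = [1] + [0] * (k - 1)
--     for c in cnts:
--         dp = [sum(dp[max(0, j - c): j + 1]) % MOD for j in range(k)]
--
--     return (ans - sum(dp)) % MOD
-- ===== Notes on version B (the rewrite author's own statement) =====
-- stated objective: simpler
-- what changed: The run-length first pass is kept, but A's (len(cnts)+1) x k cumulative prefix-sum DP table (rows f[i] of running sums built with itertools.accumulate) is replaced by a single exact-count list dp[j] = number of slack combinations summing to exactly j, updated per group by a direct window-sum comprehension, with the bad count read off as sum(dp) instead of the table corner f[-1][-1].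
import Mathlib
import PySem

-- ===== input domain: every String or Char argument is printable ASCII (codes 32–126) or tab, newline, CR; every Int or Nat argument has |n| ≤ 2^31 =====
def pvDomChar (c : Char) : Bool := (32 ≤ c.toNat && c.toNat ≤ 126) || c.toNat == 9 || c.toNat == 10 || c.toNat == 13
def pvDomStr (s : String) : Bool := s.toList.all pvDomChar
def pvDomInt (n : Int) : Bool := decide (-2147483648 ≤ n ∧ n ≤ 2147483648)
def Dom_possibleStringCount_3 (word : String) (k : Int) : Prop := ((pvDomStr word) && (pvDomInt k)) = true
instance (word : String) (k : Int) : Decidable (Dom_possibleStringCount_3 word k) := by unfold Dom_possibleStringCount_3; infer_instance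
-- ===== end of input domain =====

-- B replaces A's cumulative prefix-sum DP table by an exact-count sliding-window DP list
-- (objective: simpler — no table of rows, no accumulate; return-value equivalence only).

-- ===== PORT A =====

def pvMOD : Int := 1000000007   -- MOD = int(1e9 + 7)

-- the first loop, identical character-for-character in Source A and Source B; state (cnt, cnts, ans, k)
def pvGroupStep (chars : List Char) (n : Nat) (st : Int × List Int × Int × Int) (i : Nat) :
    Int × List Int × Int × Int :=
  let cnt := st.1 + 1
  let cnts := st.2.1
  let ans := st.2.2.1
  let k := st.2.2.2
  if i = n - 1 || chars.getD i ' ' ≠ chars.getD (i + 1) ' ' then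
    let cnts := if cnt > 1 then (if k > 0 then cnts ++ [cnt - 1] else cnts) else cnts
    let ans := if cnt > 1 then PySem.Int.mod (ans * cnt) pvMOD else ans
    (0, cnts, ans, k - 1)
  else
    (cnt, cnts, ans, k)

def pvGroupScan (word : String) (k : Int) : Int × List Int × Int × Int :=
  (List.range word.length).foldl (pvGroupStep word.toList word.length) (0, [], 1, k)

-- accumulate(xs, initial=a): hand port, exact (prefix sums with the initial value prepended)
def pvAccum : List Int → Int → List Int
  | [], a => [a]
  | x :: xs, a => a :: pvAccum xs (a + x)

-- f[i+1][j] = (s[j+1] - s[max(j-c, 0)]) % MOD for j in range(k), where s = accumulate(f[i], initial=0)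
def pvRowA (k : Int) (c : Int) (frow : List Int) : List Int :=
  let s := pvAccum frow 0
  (PySem.List.pyRange 0 k 1).map (fun j =>
    PySem.Int.mod (PySem.List.pyGetD s (j + 1) 0 - PySem.List.pyGetD s (max (j - c) 0) 0) pvMOD)

def possibleStringCount_3 (word : String) (k : Int) : Int :=
  let n : Int := word.length
  if n < k then 0
  else
    let st := pvGroupScan word k
    let cnts := st.2.1
    let ans := st.2.2.1
    let k := st.2.2.2
    if k ≤ 0 then ans
    else
      -- f[0] = [1]*k; each pass fills row i+1 from row i (= the last row so far); rows appended as computed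
      let f := cnts.foldl (fun f c => f ++ [pvRowA k c (PySem.List.pyGetD f (-1) [])])
        [List.replicate k.toNat 1]
      PySem.Int.mod (ans - PySem.List.pyGetD (PySem.List.pyGetD f (-1) []) (-1) 0) pvMOD

-- ===== PORT B =====

-- dp = [sum(dp[max(0, j - c): j + 1]) % MOD for j in range(k)]
def pvRowB (k : Int) (dp : List Int) (c : Int) : List Int :=
  (PySem.List.pyRange 0 k 1).map (fun j =>
    PySem.Int.mod (PySem.List.slice dp (some (max 0 (j - c))) (some (j + 1))).sum pvMOD)

def possibleStringCount_3_alt (word : String) (k : Int) : Int :=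
  let n : Int := word.length
  if n < k then 0
  else
    let st := pvGroupScan word k
    let cnts := st.2.1
    let ans := st.2.2.1
    let k := st.2.2.2
    if k ≤ 0 then ans
    else
      -- dp = [1] + [0] * (k - 1)
      let dp := cnts.foldl (pvRowB k) (1 :: List.replicate (k - 1).toNat 0)
      PySem.Int.mod (ans - dp.sum) pvMOD

-- ===== PRECONDITION & SPEC =====
def Spec_possibleStringCount_3 (word : String) (k : Int) (out : Int) : Prop := out = possibleStringCount_3_alt word k
instance (word : String) (k : Int) (out : Int) : Decidable (Spec_possibleStringCount_3 word k out) := by unfold Spec_possibleStringCount_3; infer_instance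

-- ===== CLAIM (what is proved, stated in full; the proofs are below) =====
def Claim_equal_possibleStringCount_3 : Prop := ∀ (word : String) (k : Int), Dom_possibleStringCount_3 word k → Spec_possibleStringCount_3 word k (possibleStringCount_3 word k)

-- ===== LEMMAS AND PROOFS =====

-- prefix sum of the first m entries (0 beyond the end)
def pvPf (dp : List Int) (m : Nat) : Int := ∑ t ∈ Finset.range m, dp.getD t 0

-- the invariant tying A's cumulative row to B's exact-count list
def pvRel (k : Nat) (frow dp : List Int) : Prop :=
  frow.length = k ∧ dp.length = k ∧
    ∀ j < k, frow.getD j 0 = pvPf dp (j + 1) % pvMOD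

theorem pvPf_eq_sum_take (dp : List Int) (m : Nat) : pvPf dp m = (dp.take m).sum := by
  induction m with
  | zero => simp [pvPf]
  | succ m ih =>
    rw [pvPf, Finset.sum_range_succ, ← pvPf, ih, List.take_add_one]
    rw [List.getD_eq_getElem?_getD]
    cases h : dp[m]? <;> simp

theorem pvAccum_getD (xs : List Int) (a : Int) (t : Nat) (ht : t ≤ xs.length) :
    (pvAccum xs a).getD t 0 = a + pvPf xs t := by
  rw [pvPf_eq_sum_take]
  induction xs generalizing a t with
  | nil =>
    cases t with
    | zero => simp [pvAccum]
    | succ t => simp at ht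
  | cons x xs ih =>
    cases t with
    | zero => simp [pvAccum]
    | succ t =>
      simp only [pvAccum, List.getD_cons_succ, List.take_succ_cons, List.sum_cons]
      rw [ih (a + x) t (by simpa using ht)]
      ring

theorem pvSliceSum (dp : List Int) (a b : Nat) (hab : a ≤ b) (_hb : b ≤ dp.length) :
    ((dp.drop a).take (b - a)).sum = pvPf dp b - pvPf dp a := by
  rw [pvPf_eq_sum_take, pvPf_eq_sum_take]
  have h1 : dp.take b = dp.take a ++ (dp.drop a).take (b - a) := by
    rw [← List.take_add]
    congr 1
    omega
  rw [h1, List.sum_append]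
  ring

theorem pvKey (F : Nat → Int) (hF0 : F 0 = 0) (c : Nat) (j : Nat) :
    ∑ t ∈ Finset.Ico (j - c) (j + 1), F (t + 1)
      = ∑ u ∈ Finset.range (j + 1), (F (u + 1) - F (u - c)) := by
  induction j with
  | zero =>
    simp [hF0]
  | succ j ih =>
    rw [Finset.sum_range_succ, ← ih,
        Finset.sum_Ico_eq_sub _ (show j - c ≤ j + 1 by omega),
        Finset.sum_Ico_eq_sub _ (show j + 1 - c ≤ j + 1 + 1 by omega)]
    rcases Nat.lt_or_ge j c with hcj | hcj
    · rw [show j + 1 - c = 0 by omega, show j - c = 0 by omega, Finset.sum_range_succ]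
      simp [hF0]
    · rw [show j + 1 - c = (j - c) + 1 by omega, Finset.sum_range_succ,
          Finset.sum_range_succ (fun x => F (x + 1)) (j - c)]
      ring

theorem pvGetD_map_pyRange (f : Int → Int) (k j : Nat) (hj : j < k) :
    ((PySem.List.pyRange 0 (k : Int) 1).map f).getD j 0 = f (j : Int) := by
  have hlen : (PySem.List.pyRange 0 (k : Int) 1).length = k := by
    simp [PySem.List.length_pyRange_one]
  rw [List.getD_eq_getElem?_getD, List.getElem?_map,
      List.getElem?_eq_getElem (by omega : j < (PySem.List.pyRange 0 (k:Int) 1).length)]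
  simp [PySem.List.getElem_pyRange_one]

theorem pvStep (k : Nat) (c : Int) (hc : 0 ≤ c) (frow dp : List Int) (h : pvRel k frow dp) :
    pvRel k (pvRowA (k : Int) c frow) (pvRowB (k : Int) dp c) := by
  obtain ⟨hfl, hdl, hrel⟩ := h
  obtain ⟨cn, rfl⟩ : ∃ cn : Nat, c = (cn : Int) := ⟨c.toNat, (Int.toNat_of_nonneg hc).symm⟩
  have hMOD : (0:Int) < pvMOD := by norm_num [pvMOD]
  have hmod : ∀ x : Int, PySem.Int.mod x pvMOD = x % pvMOD :=
    fun x => PySem.Int.mod_eq_emod_of_pos hMOD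
  refine ⟨by simp [pvRowA, PySem.List.length_pyRange_one],
          by simp [pvRowB, PySem.List.length_pyRange_one], ?_⟩
  intro j hj
  -- B-side entries
  have hB : ∀ u : Nat, u < k → (pvRowB (k:Int) dp (cn:Int)).getD u 0
      = (pvPf dp (u+1) - pvPf dp (u - cn)) % pvMOD := by
    intro u hu
    rw [show pvRowB (k:Int) dp (cn:Int) = (PySem.List.pyRange 0 (k:Int) 1).map (fun j =>
          PySem.Int.mod (PySem.List.slice dp (some (max 0 (j - (cn:Int)))) (some (j + 1))).sum pvMOD)
        from rfl,
        pvGetD_map_pyRange _ k u hu]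
    have h1 : max 0 ((u:Int) - (cn:Int)) = ((u - cn : Nat) : Int) := by omega
    have h2 : (u:Int) + 1 = ((u + 1 : Nat) : Int) := by push_cast; ring
    rw [h1, h2, PySem.List.slice_natCast,
        pvSliceSum dp (u - cn) (u + 1) (by omega) (by omega), hmod]
  -- A-side entry at j
  have hA : (pvRowA (k:Int) (cn:Int) frow).getD j 0
      = (pvPf frow (j+1) - pvPf frow (j - cn)) % pvMOD := by
    rw [show pvRowA (k:Int) (cn:Int) frow = (PySem.List.pyRange 0 (k:Int) 1).map (fun j =>
          PySem.Int.mod (PySem.List.pyGetD (pvAccum frow 0) (j + 1) 0 -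
            PySem.List.pyGetD (pvAccum frow 0) (max (j - (cn:Int)) 0) 0) pvMOD)
        from rfl,
        pvGetD_map_pyRange _ k j hj]
    have h1 : (j:Int) + 1 = ((j + 1 : Nat) : Int) := by push_cast; ring
    have h2 : max ((j:Int) - (cn:Int)) 0 = ((j - cn : Nat) : Int) := by omega
    rw [h1, h2, PySem.List.pyGetD_natCast, PySem.List.pyGetD_natCast,
        pvAccum_getD frow 0 (j+1) (by omega), pvAccum_getD frow 0 (j - cn) (by omega), hmod]
    ring_nf
  rw [hA]
  have key1 : pvPf frow (j+1) - pvPf frow (j - cn)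
      = ∑ t ∈ Finset.Ico (j - cn) (j+1), (pvPf dp (t+1) % pvMOD) := by
    rw [Finset.sum_Ico_eq_sub _ (by omega : j - cn ≤ j + 1)]
    rw [show (∑ t ∈ Finset.range (j+1), (pvPf dp (t+1) % pvMOD)) -
          (∑ t ∈ Finset.range (j - cn), (pvPf dp (t+1) % pvMOD))
        = (∑ t ∈ Finset.range (j+1), (pvPf dp (t+1) % pvMOD)) -
          (∑ t ∈ Finset.range (j - cn), (pvPf dp (t+1) % pvMOD)) from rfl]
    have e1 : ∀ m : Nat, m ≤ k → pvPf frow m = ∑ t ∈ Finset.range m, (pvPf dp (t+1) % pvMOD) := by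
      intro m hm
      exact Finset.sum_congr rfl (fun t ht => hrel t (by
        have := Finset.mem_range.mp ht; omega))
    rw [e1 (j+1) (by omega), e1 (j - cn) (by omega)]
  rw [key1]
  have key2 : pvPf (pvRowB (k:Int) dp (cn:Int)) (j+1)
      = ∑ u ∈ Finset.range (j+1), ((pvPf dp (u+1) - pvPf dp (u - cn)) % pvMOD) := by
    exact Finset.sum_congr rfl (fun u hu => hB u (by
      have := Finset.mem_range.mp hu; omega))
  rw [key2, ← Finset.sum_int_mod, ← Finset.sum_int_mod,
      pvKey (pvPf dp) (by simp [pvPf]) cn j]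

theorem pvFold (k : Nat) (cnts : List Int) :
    ∀ (f : List (List Int)) (hf : f ≠ []) (dp : List Int), (∀ c ∈ cnts, 0 ≤ c) →
      pvRel k (f.getLast hf) dp →
      ∃ hne : (cnts.foldl (fun f c => f ++ [pvRowA (k : Int) c (PySem.List.pyGetD f (-1) [])]) f) ≠ [],
        pvRel k ((cnts.foldl (fun f c => f ++ [pvRowA (k : Int) c (PySem.List.pyGetD f (-1) [])]) f).getLast hne)
          (cnts.foldl (pvRowB (k : Int)) dp) := by
  induction cnts with
  | nil => exact fun f hf dp _ h => ⟨hf, h⟩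
  | cons c cs ih =>
    intro f hf dp hc h
    simp only [List.foldl_cons]
    have hgl : PySem.List.pyGetD f (-1) [] = f.getLast hf := PySem.List.pyGetD_neg_one f [] hf
    have hne' : f ++ [pvRowA (k:Int) c (PySem.List.pyGetD f (-1) [])] ≠ [] := by simp
    have hlast : (f ++ [pvRowA (k:Int) c (PySem.List.pyGetD f (-1) [])]).getLast hne'
        = pvRowA (k:Int) c (PySem.List.pyGetD f (-1) []) := by
      simp
    refine ih _ hne' _ (fun c' hc' => hc c' (by simp [hc'])) ?_
    rw [hlast, hgl]
    exact pvStep k c (hc c (by simp)) _ _ h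

theorem pvStepInv (chars : List Char) (n : Nat) (st : Int × List Int × Int × Int) (i : Nat)
    (h1 : 0 ≤ st.1) (h2 : ∀ c ∈ st.2.1, 0 ≤ c) :
    0 ≤ (pvGroupStep chars n st i).1 ∧ ∀ c ∈ (pvGroupStep chars n st i).2.1, 0 ≤ c := by
  obtain ⟨cnt, cnts, ans, k⟩ := st
  simp only at h1 h2
  simp only [pvGroupStep]
  split_ifs with hb hgt hk
  · refine ⟨by norm_num, fun c hcm => ?_⟩
    rcases List.mem_append.mp hcm with h | h
    · exact h2 c h
    · simp at h
      omega
  · exact ⟨by norm_num, h2⟩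
  · exact ⟨by norm_num, h2⟩
  · exact ⟨by omega, h2⟩

theorem pvFoldInv (chars : List Char) (n : Nat) (l : List Nat) :
    ∀ st : Int × List Int × Int × Int, 0 ≤ st.1 → (∀ c ∈ st.2.1, 0 ≤ c) →
      0 ≤ (l.foldl (pvGroupStep chars n) st).1 ∧
        ∀ c ∈ (l.foldl (pvGroupStep chars n) st).2.1, 0 ≤ c := by
  induction l with
  | nil => exact fun st h1 h2 => ⟨h1, h2⟩
  | cons i l ih =>
    intro st h1 h2
    simp only [List.foldl_cons]
    obtain ⟨g1, g2⟩ := pvStepInv chars n st i h1 h2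
    exact ih _ g1 g2

theorem pvCntsNonneg (word : String) (k : Int) : ∀ c ∈ (pvGroupScan word k).2.1, 0 ≤ c :=
  (pvFoldInv word.toList word.length (List.range word.length) (0, [], 1, k)
    (by norm_num) (by simp)).2

theorem pvInit (kk : Nat) (hk : 0 < kk) :
    pvRel kk (List.replicate kk 1) (1 :: List.replicate (kk - 1) 0) := by
  refine ⟨by simp, by simp; omega, ?_⟩
  intro j hj
  have hval : pvPf (1 :: List.replicate (kk - 1) 0) (j + 1) = 1 := by
    rw [pvPf_eq_sum_take]
    simp [List.take_replicate]
  rw [hval, List.getD_eq_getElem?_getD, List.getElem?_replicate, if_pos hj]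
  norm_num [pvMOD]

theorem pvFinal (kk : Nat) (hk : 0 < kk) (frow dp : List Int) (h : pvRel kk frow dp) :
    PySem.List.pyGetD frow (-1) 0 = dp.sum % pvMOD := by
  obtain ⟨hfl, hdl, hrel⟩ := h
  have hne : frow ≠ [] := by
    intro e
    rw [e] at hfl
    simp at hfl
    omega
  rw [PySem.List.pyGetD_neg_one frow 0 hne, List.getLast_eq_getElem,
      ← List.getD_eq_getElem frow 0 (by omega)]
  have := hrel (kk - 1) (by omega)
  rw [hfl, this]
  congr 1
  rw [pvPf_eq_sum_take, show kk - 1 + 1 = kk by omega, ← hdl, List.take_length]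

-- ===== VERDICT (by name: the statement is the Claim_ definition above) =====
theorem possibleStringCount_3_spec : Claim_equal_possibleStringCount_3 := by
  unfold Claim_equal_possibleStringCount_3
  intro word k _
  unfold Spec_possibleStringCount_3
  by_cases h1 : (word.length : Int) < k
  · simp [possibleStringCount_3, possibleStringCount_3_alt, h1]
  · by_cases h2 : (pvGroupScan word k).2.2.2 ≤ 0
    · simp [possibleStringCount_3, possibleStringCount_3_alt, h1, h2]
    · have hMOD : (0:Int) < pvMOD := by norm_num [pvMOD]
      have hmod : ∀ x : Int, PySem.Int.mod x pvMOD = x % pvMOD :=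
        fun x => PySem.Int.mod_eq_emod_of_pos hMOD
      simp only [possibleStringCount_3, possibleStringCount_3_alt, if_neg h1, if_neg h2]
      have hcast : (((pvGroupScan word k).2.2.2.toNat : Nat) : Int) = (pvGroupScan word k).2.2.2 :=
        Int.toNat_of_nonneg (by omega)
      set kk := (pvGroupScan word k).2.2.2.toNat with hkk
      have hkpos : 0 < kk := by omega
      rw [← hcast, show ((kk : Int) - 1).toNat = kk - 1 by omega]
      obtain ⟨hne, hrel⟩ := pvFold kk (pvGroupScan word k).2.1 [List.replicate kk 1] (by simp)
        (1 :: List.replicate (kk - 1) 0) (pvCntsNonneg word k)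
        (by rw [List.getLast_singleton]; exact pvInit kk hkpos)
      rw [PySem.List.pyGetD_neg_one _ [] hne, pvFinal kk hkpos _ _ hrel, hmod, hmod,
          Int.sub_emod, Int.emod_emod_of_dvd _ dvd_rfl, ← Int.sub_emod]
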